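-- pv_equiv track=rewrite | github.com/sunjw/some-learning | List2Yaml/list_to_yaml.py | need_quote_yaml
-- ===== SOURCE A (Python) =====
-- def need_quote_yaml(yaml_str):
--     special_chars = ['\'', '{', '}', '[', ']', ',', '&', ':', '*', '#',
--                      '?', '|', '<', '>', '=', '!', '%', '@', '\\', '"']
--     for spec_shar in special_chars:
--         if yaml_str.find(spec_shar) != -1:
--             if spec_shar == '\'':
--                 return '"'
--             else:
--                 return '\''
--
--     return None
-- ===== SOURCE B (Python) =====
-- def need_quote_yaml(yaml_str):
--     if "'" in yaml_str:
--         return '"'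
--     rest = set('{}[],&:*#?|<>=!%@\\"')
--     for ch in yaml_str:
--         if ch in rest:
--             return "'"
--     return None
-- ===== Notes on version B (the rewrite author's own statement) =====
-- stated objective: simpler
-- what changed: Replaces A's loop of up to 20 full-string .find scans with one apostrophe containment check followed by a single pass over the characters against a precomputed set of the remaining special characters.
import Mathlib
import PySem

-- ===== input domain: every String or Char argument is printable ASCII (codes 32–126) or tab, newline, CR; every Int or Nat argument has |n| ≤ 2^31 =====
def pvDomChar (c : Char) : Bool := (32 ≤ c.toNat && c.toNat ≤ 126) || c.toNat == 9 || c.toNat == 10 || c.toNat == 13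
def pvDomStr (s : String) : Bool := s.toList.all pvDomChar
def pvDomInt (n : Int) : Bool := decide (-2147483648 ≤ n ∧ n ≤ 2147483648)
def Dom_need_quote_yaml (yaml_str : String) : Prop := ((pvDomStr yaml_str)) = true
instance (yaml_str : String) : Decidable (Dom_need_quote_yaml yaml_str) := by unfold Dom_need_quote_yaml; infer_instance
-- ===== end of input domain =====

-- B replaces A's sequence of up to 20 full-string .find scans by one apostrophe check plus a
-- single character pass against a set of the remaining special characters (objective: simpler).

-- ===== PORT A =====
def specialChars : List String :=
  ["'", "{", "}", "[", "]", ",", "&", ":", "*", "#",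
   "?", "|", "<", ">", "=", "!", "%", "@", "\\", "\""]

def needLoop (yaml_str : String) : List String → Option String
  | [] => none
  | spec :: rest =>
    if PySem.Str.find yaml_str spec ≠ -1 then
      if spec = "'" then some "\"" else some "'"
    else needLoop yaml_str rest

def need_quote_yaml (yaml_str : String) : Option String :=
  needLoop yaml_str specialChars

-- ===== PORT B =====
def restSet : PySem.Set Char :=
  PySem.Set.ofList ['{', '}', '[', ']', ',', '&', ':', '*', '#',
                    '?', '|', '<', '>', '=', '!', '%', '@', '\\', '"']

def scanB : List Char → Option String
  | [] => none
  | ch :: cs => if ch ∈ restSet then some "'" else scanB cs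

def need_quote_yaml_alt (yaml_str : String) : Option String :=
  if PySem.Str.isIn "'" yaml_str then some "\"" else scanB yaml_str.toList

-- ===== PRECONDITION & SPEC =====
def Spec_need_quote_yaml (yaml_str : String) (out : Option String) : Prop := out = need_quote_yaml_alt yaml_str
instance (yaml_str : String) (out : Option String) : Decidable (Spec_need_quote_yaml yaml_str out) := by unfold Spec_need_quote_yaml; infer_instance

-- ===== CLAIM (what is proved, stated in full; the proofs are below) =====
def Claim_equal_need_quote_yaml : Prop := ∀ (yaml_str : String), Dom_need_quote_yaml yaml_str → Spec_need_quote_yaml yaml_str (need_quote_yaml yaml_str)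

-- ===== LEMMAS AND PROOFS =====

-- the char list behind restSet, and the non-apostrophe tail of specialChars
def restL : List Char :=
  ['{', '}', '[', ']', ',', '&', ':', '*', '#',
   '?', '|', '<', '>', '=', '!', '%', '@', '\\', '"']

lemma singleton_infix {c : Char} {l : List Char} : [c] <:+: l ↔ c ∈ l := by
  constructor
  · intro h; exact List.singleton_sublist.mp h.sublist
  · intro h
    obtain ⟨s, t, rfl⟩ := List.append_of_mem h
    exact ⟨s, t, by simp⟩

lemma find_single_eq (s : String) (c : Char) :
    (PySem.Chars.find s.toList [c] = -1) = (c ∉ s.toList) := by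
  simp [PySem.Chars.find_eq_neg_one_iff (s := s.toList) (sub := [c]), singleton_infix]

lemma restSet_eq : restSet = restL := by decide

lemma specialChars_eq : specialChars = "'" :: restL.map (fun c => String.ofList [c]) := by decide

lemma scan_eq (l : List Char) :
    scanB l = if ∃ c ∈ l, c ∈ restL then some "'" else none := by
  induction l with
  | nil => simp [scanB]
  | cons ch cs ih =>
    by_cases h : ch ∈ restL
    · simp [scanB, restSet_eq, h]
    · simp [scanB, restSet_eq, h, ih]

lemma loop_eq (s : String) (l : List Char) (h : '\'' ∉ l) :
    needLoop s (l.map (fun c => String.ofList [c])) =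
      if ∃ c ∈ l, c ∈ s.toList then some "'" else none := by
  induction l with
  | nil => simp [needLoop]
  | cons c cs ih =>
    have hc : c ≠ '\'' := fun hc => h (hc ▸ List.mem_cons_self)
    have hne : String.ofList [c] ≠ "'" := by
      intro hmk
      have := congrArg String.toList hmk
      simp at this
      exact hc this
    by_cases hmem : c ∈ s.toList
    · simp [needLoop, find_single_eq, hne, hmem]
    · simp [needLoop, find_single_eq, hmem, ih (fun hx => h (List.mem_cons_of_mem _ hx))]

-- ===== VERDICT (by name: the statement is the Claim_ definition above) =====
theorem need_quote_yaml_spec : Claim_equal_need_quote_yaml := by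
  intro s _
  unfold Spec_need_quote_yaml need_quote_yaml need_quote_yaml_alt
  rw [specialChars_eq]
  by_cases h : '\'' ∈ s.toList
  · have hfind : ¬ (PySem.Chars.find s.toList ['\''] = -1) := by
      simp [find_single_eq, h]
    have hisin : PySem.Chars.isIn ['\''] s.toList = true :=
      (PySem.Chars.isIn_iff_infix ['\''] s.toList).mpr (singleton_infix.mpr h)
    simp [needLoop, hfind, hisin]
  · have hfind : PySem.Chars.find s.toList ("'" : String).toList = -1 := by
      simp [show ("'" : String).toList = ['\''] from rfl, find_single_eq, h]
    have hisin : PySem.Chars.isIn ("'" : String).toList s.toList = false :=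
      (PySem.Chars.isIn_eq_false_iff _ s.toList).mpr
        (fun hinf => h (singleton_infix.mp hinf))
    simp only [needLoop, PySem.Str.find_eq, PySem.Str.isIn_eq, hfind, hisin,
      ne_eq, not_true_eq_false, if_false, Bool.false_eq_true, reduceIte]
    rw [loop_eq s restL (by decide), scan_eq]
    congr 1
    simp only [eq_iff_iff]
    constructor
    · rintro ⟨c, hc, hs⟩; exact ⟨c, hs, hc⟩
    · rintro ⟨c, hs, hc⟩; exact ⟨c, hc, hs⟩
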